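-- pv_equiv track=rewrite | github.com/FzArnob/problem_solving | codeforces/Codeforces Round 891 (Div. 3)/A - Array Coloring - Solution.py | can_color_array_two_colors
-- ===== SOURCE A (Python) =====
-- def can_color_array_two_colors(n, arr):
--     total_sum = sum(arr)
--     sub_array_sum = 0
--
--     for i in range(n):
--         sub_array_sum += arr[i]
--         remaining_sum = total_sum - sub_array_sum
--         if sub_array_sum % 2 == remaining_sum % 2:
--             return "YES"
--
--     return "NO"
-- ===== SOURCE B (Python) =====
-- def can_color_array_two_colors(n, arr):
--     return "YES" if n > 0 and sum(arr) % 2 == 0 else "NO"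
-- ===== Notes on version B (the rewrite author's own statement) =====
-- stated objective: simpler
-- what changed: The prefix loop is replaced by the closed-form parity check: a prefix and its complement have equal parity iff the total sum is even, so B returns YES exactly when n > 0 and sum(arr) is even.
import Mathlib
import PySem

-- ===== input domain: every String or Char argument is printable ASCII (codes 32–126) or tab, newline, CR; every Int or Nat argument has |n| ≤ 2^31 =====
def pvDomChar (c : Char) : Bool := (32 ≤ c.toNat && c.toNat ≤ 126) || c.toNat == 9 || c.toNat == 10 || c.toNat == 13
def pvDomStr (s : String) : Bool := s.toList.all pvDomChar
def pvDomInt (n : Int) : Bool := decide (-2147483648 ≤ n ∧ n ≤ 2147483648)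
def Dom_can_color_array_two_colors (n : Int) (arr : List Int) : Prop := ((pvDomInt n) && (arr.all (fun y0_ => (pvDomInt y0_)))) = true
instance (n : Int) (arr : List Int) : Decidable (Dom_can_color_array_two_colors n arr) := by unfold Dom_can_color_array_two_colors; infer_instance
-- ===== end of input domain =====

-- B replaces A's prefix loop by the closed-form parity check (a split point with equal-parity halves exists iff the total sum is even): simpler, one expression.

-- ===== PORT A =====
-- loop of A: 'for i in range(n)' iterated lazily (as Python's range is) via an index counter;
-- pyGet? = none is Python's IndexError (excluded by Pre_)
def pvALoop (arr : List Int) (total n : Int) (sub i : Int) : String :=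
  if _h : i < n then
    match PySem.List.pyGet? arr i with
    | none => "NO"   -- Python raises IndexError here; such inputs are outside Pre_
    | some v =>
      if PySem.Int.mod (sub + v) 2 = PySem.Int.mod (total - (sub + v)) 2 then "YES"
      else pvALoop arr total n (sub + v) (i + 1)
  else "NO"
termination_by (n - i).toNat
decreasing_by omega

def can_color_array_two_colors (n : Int) (arr : List Int) : String :=
  pvALoop arr arr.sum n 0 0

-- ===== PORT B =====
def can_color_array_two_colors_alt (n : Int) (arr : List Int) : String :=
  if 0 < n ∧ PySem.Int.mod arr.sum 2 = 0 then "YES" else "NO"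

-- ===== PRECONDITION & SPEC =====
-- Pre_ excludes exactly the inputs where A raises IndexError: n exceeds len(arr) and the
-- loop does not return "YES" at index 0 (i.e. arr is empty or the total sum is odd).
def Pre_can_color_array_two_colors (n : Int) (arr : List Int) : Prop :=
  n ≤ arr.length ∨ (arr ≠ [] ∧ PySem.Int.mod arr.sum 2 = 0)
instance (n : Int) (arr : List Int) : Decidable (Pre_can_color_array_two_colors n arr) := by
  unfold Pre_can_color_array_two_colors; infer_instance

def pvWitness_can_color_array_two_colors : Int × List Int := (3, [1, 2, 3])

def Spec_can_color_array_two_colors (n : Int) (arr : List Int) (out : String) : Prop := out = can_color_array_two_colors_alt n arr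
instance (n : Int) (arr : List Int) (out : String) : Decidable (Spec_can_color_array_two_colors n arr out) := by unfold Spec_can_color_array_two_colors; infer_instance

-- ===== CLAIM (what is proved, stated in full; the proofs are below) =====
def Claim_equal_can_color_array_two_colors : Prop := ∀ (n : Int) (arr : List Int), Dom_can_color_array_two_colors n arr → Pre_can_color_array_two_colors n arr → Spec_can_color_array_two_colors n arr (can_color_array_two_colors n arr)

-- ===== LEMMAS AND PROOFS =====

-- a prefix and its complement have equal parity iff the total is even
lemma pv_parity (s t : Int) :
    (PySem.Int.mod s 2 = PySem.Int.mod (t - s) 2) ↔ PySem.Int.mod t 2 = 0 := by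
  simp only [PySem.Int.mod_eq_emod_of_pos (by norm_num : (0:Int) < 2)]
  omega

lemma pvALoop_no (arr : List Int) (total n : Int)
    (h : PySem.Int.mod total 2 ≠ 0) :
    ∀ (k : Nat) (i sub : Int), (n - i).toNat = k → pvALoop arr total n sub i = "NO" := by
  intro k
  induction k with
  | zero =>
    intro i sub hk
    rw [pvALoop, dif_neg (by omega)]
  | succ m ih =>
    intro i sub hk
    rw [pvALoop]
    by_cases hi : i < n
    · rw [dif_pos hi]
      cases PySem.List.pyGet? arr i with
      | none => rfl
      | some v =>
        have hne : ¬ PySem.Int.mod (sub + v) 2 = PySem.Int.mod (total - (sub + v)) 2 :=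
          fun hc => h ((pv_parity _ _).mp hc)
        show (if PySem.Int.mod (sub + v) 2 = PySem.Int.mod (total - (sub + v)) 2 then "YES"
              else pvALoop arr total n (sub + v) (i + 1)) = "NO"
        rw [if_neg hne]
        exact ih (i + 1) _ (by omega)
    · rw [dif_neg hi]

lemma pvALoop_yes (x : Int) (xs : List Int) (total n : Int)
    (hn : 0 < n) (h : PySem.Int.mod total 2 = 0) :
    pvALoop (x :: xs) total n 0 0 = "YES" := by
  rw [pvALoop, dif_pos hn]
  simp only [PySem.List.pyGet?_zero_cons]
  show (if PySem.Int.mod (0 + x) 2 = PySem.Int.mod (total - (0 + x)) 2 then "YES"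
        else pvALoop (x :: xs) total n (0 + x) (0 + 1)) = "YES"
  rw [if_pos ((pv_parity _ _).mpr h)]

-- ===== VERDICT (by name: the statement is the Claim_ definition above) =====
theorem can_color_array_two_colors_spec : Claim_equal_can_color_array_two_colors := by
  intro n arr _ hpre
  unfold Spec_can_color_array_two_colors can_color_array_two_colors can_color_array_two_colors_alt
  by_cases hn : 0 < n
  · by_cases hev : PySem.Int.mod arr.sum 2 = 0
    · rw [if_pos ⟨hn, hev⟩]
      have harr : arr ≠ [] := by
        rcases hpre with h | h
        · intro he; subst he; simp at h; omega
        · exact h.1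
      obtain ⟨x, xs, rfl⟩ := List.exists_cons_of_ne_nil harr
      exact pvALoop_yes x xs _ _ hn hev
    · rw [if_neg (by tauto)]
      exact pvALoop_no _ _ _ hev _ _ _ rfl
  · rw [if_neg (by tauto), pvALoop, dif_neg (by omega)]
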